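-- pv_equiv track=rewrite | github.com/xjfcnfw3/algorithm | programers/숫자짝궁.py | solution
-- ===== SOURCE A (Python) =====
-- from collections import Counter
--
-- def solution(X, Y):
--     x = Counter(X)
--     y = Counter(Y)
--     answer = ""
--     for i in range(9, -1, -1):
--         i = str(i)
--         if i in x and i in y:
--             if i == "0" and answer == '':
--                 answer = "0"
--             else:
--                 answer += "".join([i for _ in range(min(x[i], y[i]))])
--     if answer:
--         return answer
--     return "-1"
-- ===== SOURCE B (Python) =====
-- def solution(X, Y):
--     xs = sorted((c for c in X if '0' <= c <= '9'), reverse=True)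
--     ys = sorted((c for c in Y if '0' <= c <= '9'), reverse=True)
--     out = []
--     i = j = 0
--     while i < len(xs) and j < len(ys):
--         if xs[i] == ys[j]:
--             out.append(xs[i])
--             i += 1
--             j += 1
--         elif xs[i] > ys[j]:
--             i += 1
--         else:
--             j += 1
--     if not out:
--         return '-1'
--     if out[0] == '0':
--         return '0'
--     return ''.join(out)
-- ===== Notes on version B (the rewrite author's own statement) =====
-- stated objective: alternative
-- what changed: Replaces the Counter-intersection over a fixed 9..0 digit loop with a sort-then-merge algorithm: filter each string to its digits, sort both descending, and walk them with two pointers collecting the multiset intersection in order; the all-zero special case becomes a post-hoc leading-'0' check.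
import Mathlib
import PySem

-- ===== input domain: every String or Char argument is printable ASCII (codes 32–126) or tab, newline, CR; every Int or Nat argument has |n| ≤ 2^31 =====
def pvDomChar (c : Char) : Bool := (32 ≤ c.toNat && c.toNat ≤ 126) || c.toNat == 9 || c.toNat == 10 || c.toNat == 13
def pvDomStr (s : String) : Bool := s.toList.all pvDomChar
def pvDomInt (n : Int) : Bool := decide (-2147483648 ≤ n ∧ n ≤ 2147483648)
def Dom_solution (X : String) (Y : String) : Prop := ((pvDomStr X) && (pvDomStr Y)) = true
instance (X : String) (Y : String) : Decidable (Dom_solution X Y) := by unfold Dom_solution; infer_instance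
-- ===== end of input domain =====

-- B replaces A's Counter intersection over a fixed 9..0 digit loop by sort-then-merge: filter to
-- digits, sort both descending, take the multiset intersection with a two-pointer walk (alternative algorithm).

-- ===== PORT A =====
-- Python's one-char strings str(i) are ported as the Char Char.ofNat (48 + i.toNat); answer is kept as List Char.
def solution (X : String) (Y : String) : String :=
  let x := PySem.Dict.counter X.toList
  let y := PySem.Dict.counter Y.toList
  let answer : List Char :=
    (PySem.List.pyRange 9 (-1) (-1)).foldl (fun answer i =>
      let c := Char.ofNat (48 + i.toNat)
      if x.contains c && y.contains c then
        if c == '0' && answer == ([] : List Char) then ['0']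
        else answer ++ List.replicate (min (x.getD c 0) (y.getD c 0)).toNat c
      else answer) []
  if answer == ([] : List Char) then "-1" else String.mk answer

-- ===== PORT B =====
-- Source B's two-pointer while loop over the two descending-sorted lists, transcribed as the obvious
-- recursion on the two remaining suffixes (the loop state xs[i:], ys[j:]).
def interDesc : List Char → List Char → List Char
  | [], _ => []
  | _ :: _, [] => []
  | x :: xs, y :: ys =>
      if x == y then x :: interDesc xs ys
      else if x > y then interDesc xs (y :: ys)
      else interDesc (x :: xs) ys
termination_by a b => a.length + b.length
decreasing_by all_goals (simp [List.length_cons]; try omega)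

def solution_alt (X : String) (Y : String) : String :=
  let xs := PySem.List.sorted (X.toList.filter (fun c => decide ('0' ≤ c ∧ c ≤ '9'))) (fun c => c) true
  let ys := PySem.List.sorted (Y.toList.filter (fun c => decide ('0' ≤ c ∧ c ≤ '9'))) (fun c => c) true
  let out := interDesc xs ys
  if out = [] then "-1"
  else if out[0]! == '0' then "0"
  else String.mk out

-- ===== PRECONDITION & SPEC =====
def Spec_solution (X : String) (Y : String) (out : String) : Prop := out = solution_alt X Y
instance (X : String) (Y : String) (out : String) : Decidable (Spec_solution X Y out) := by unfold Spec_solution; infer_instance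

-- ===== CLAIM (what is proved, stated in full; the proofs are below) =====
def Claim_equal_solution : Prop := ∀ (X : String) (Y : String), Dom_solution X Y → Spec_solution X Y (solution X Y)

-- ===== LEMMAS AND PROOFS =====

-- digit-repeat block: min-count many copies of the digit character 48+d
def repl (lx ly : List Char) (d : Nat) : List Char :=
  List.replicate (min (lx.count (Char.ofNat (48 + d))) (ly.count (Char.ofNat (48 + d)))) (Char.ofNat (48 + d))

lemma pyRange_eval : PySem.List.pyRange 9 (-1) (-1) = [9,8,7,6,5,4,3,2,1,0] := by decide

lemma toNat_min_cast (a b : Nat) : (min (a : Int) (b : Int)).toNat = min a b := by omega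

lemma stepA (lx ly : List Char) (c : Char) (acc : List Char) (hc : (c == '0') = false) :
    (if (PySem.Dict.counter lx).contains c && (PySem.Dict.counter ly).contains c then
       if c == '0' && acc == ([] : List Char) then ['0']
       else acc ++ List.replicate (min ((PySem.Dict.counter lx).getD c 0) ((PySem.Dict.counter ly).getD c 0)).toNat c
     else acc)
    = acc ++ List.replicate (min (lx.count c) (ly.count c)) c := by
  simp only [PySem.Dict.contains_counter, PySem.Dict.getD_counter, hc, Bool.false_and,
    toNat_min_cast]
  by_cases h1 : lx.contains c
  · by_cases h2 : ly.contains c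
    · have h1' : c ∈ lx := by simpa using h1
      have h2' : c ∈ ly := by simpa using h2
      simp [h1', h2']
    · have : ly.count c = 0 :=
        List.count_eq_zero_of_not_mem (by simpa using h2)
      simp [this]
  · have : lx.count c = 0 :=
      List.count_eq_zero_of_not_mem (by simpa using h1)
    simp [this]

lemma step0 (lx ly : List Char) (acc : List Char) :
    (if (PySem.Dict.counter lx).contains '0' && (PySem.Dict.counter ly).contains '0' then
       if ('0' : Char) == '0' && acc == ([] : List Char) then ['0']
       else acc ++ List.replicate (min ((PySem.Dict.counter lx).getD '0' 0) ((PySem.Dict.counter ly).getD '0' 0)).toNat '0'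
     else acc)
    = if 0 < min (lx.count '0') (ly.count '0') then
        (if acc = [] then ['0'] else acc ++ repl lx ly 0)
      else acc := by
  have hr : repl lx ly 0 = List.replicate (min (lx.count '0') (ly.count '0')) '0' := rfl
  simp only [PySem.Dict.contains_counter, PySem.Dict.getD_counter, toNat_min_cast, hr]
  by_cases h1 : '0' ∈ lx
  · by_cases h2 : '0' ∈ ly
    · have hpos : 0 < min (lx.count '0') (ly.count '0') := by
        simp [List.count_pos_iff, h1, h2]
      by_cases ha : acc = ([] : List Char) <;> simp [h1, h2, ha, hpos]
    · have h0 : ly.count '0' = 0 := List.count_eq_zero_of_not_mem h2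
      simp [h1, h2, h0]
  · have h0 : lx.count '0' = 0 := List.count_eq_zero_of_not_mem h1
    simp [h1, h0]

lemma char_eq_of_toNat (a b : Char) (h : a.toNat = b.toNat) : a = b := by
  cases a; cases b; simp_all [Char.toNat]; exact UInt32.toNat_inj.mp h

lemma toNat_dchar (d : Nat) (hd : d < 10) : (Char.ofNat (48 + d)).toNat = 48 + d := by
  interval_cases d <;> decide

lemma digit_le_iff (ch : Char) : ('0' ≤ ch ∧ ch ≤ '9') ↔ (48 ≤ ch.toNat ∧ ch.toNat ≤ 57) := by
  simp [Char.le_def, UInt32.le_iff_toNat_le]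

lemma dchar_ne_zero (d : Int) (h1 : 1 ≤ d) (h9 : d ≤ 9) :
    (Char.ofNat (48 + d.toNat) == '0') = false := by
  have hd : d.toNat < 10 := by omega
  have ht := toNat_dchar d.toNat hd
  simp only [beq_eq_false_iff_ne, ne_eq]
  intro hc
  rw [hc] at ht
  have h0 : ('0' : Char).toNat = 48 := rfl
  rw [h0] at ht
  omega

-- A's loop body as a named function (definitionally equal to the lambda in `solution`)
def bodyA (lx ly : List Char) (answer : List Char) (i : Int) : List Char :=
  let c := Char.ofNat (48 + i.toNat)
  if (PySem.Dict.counter lx).contains c && (PySem.Dict.counter ly).contains c then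
    if c == '0' && answer == ([] : List Char) then ['0']
    else answer ++ List.replicate (min ((PySem.Dict.counter lx).getD c 0) ((PySem.Dict.counter ly).getD c 0)).toNat c
  else answer

lemma solution_eq (X Y : String) : solution X Y =
    (let answer := List.foldl (bodyA X.toList Y.toList) [] (PySem.List.pyRange 9 (-1) (-1))
     if answer == ([] : List Char) then "-1" else String.mk answer) := rfl

lemma bodyA_step (lx ly : List Char) (acc : List Char) (d : Int) (h1 : 1 ≤ d) (h9 : d ≤ 9) :
    bodyA lx ly acc d = acc ++ repl lx ly d.toNat := by
  simp only [bodyA]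
  rw [stepA lx ly (Char.ofNat (48 + d.toNat)) acc (dchar_ne_zero d h1 h9)]
  rfl

lemma bodyA_zero (lx ly : List Char) (acc : List Char) :
    bodyA lx ly acc 0 = if 0 < min (lx.count '0') (ly.count '0') then
        (if acc = [] then ['0'] else acc ++ repl lx ly 0)
      else acc := by
  have h0 : Char.ofNat (48 + (0 : Int).toNat) = '0' := rfl
  simp only [bodyA, h0]
  exact step0 lx ly acc

lemma foldA (lx ly : List Char) (ds : List Int) : ∀ (acc : List Char),
    (∀ d ∈ ds, 1 ≤ d ∧ d ≤ 9) →
    List.foldl (bodyA lx ly) acc ds = acc ++ ds.flatMap (fun d => repl lx ly d.toNat) := by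
  induction ds with
  | nil => intro acc _; simp
  | cons d t ih =>
    intro acc hmem
    have hd := hmem d (by simp)
    simp only [List.foldl_cons, List.flatMap_cons]
    rw [bodyA_step lx ly acc d hd.1 hd.2,
      ih _ (fun x hx => hmem x (List.mem_cons_of_mem _ hx)), List.append_assoc]

lemma hA (X Y : String) : solution X Y =
    (let L := ([9,8,7,6,5,4,3,2,1] : List Int).flatMap (fun d => repl X.toList Y.toList d.toNat)
     let answer := if 0 < min (X.toList.count '0') (Y.toList.count '0') then
         (if L = [] then ['0'] else L ++ repl X.toList Y.toList 0)
       else L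
     if answer = [] then "-1" else String.mk answer) := by
  rw [solution_eq, pyRange_eval,
    show ([9,8,7,6,5,4,3,2,1,0] : List Int) = [9,8,7,6,5,4,3,2,1] ++ [0] from rfl,
    List.foldl_append, foldA X.toList Y.toList [9,8,7,6,5,4,3,2,1] [] (by decide)]
  simp only [List.foldl_cons, List.foldl_nil, List.nil_append, bodyA_zero, beq_iff_eq]

lemma final (lx ly : List Char) :
    (let L := ([9,8,7,6,5,4,3,2,1] : List Int).flatMap (fun d => repl lx ly d.toNat)
     let answer := if 0 < min (lx.count '0') (ly.count '0') then
         (if L = [] then ['0'] else L ++ repl lx ly 0)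
       else L
     if answer = [] then "-1" else String.mk answer)
    = (let L := ([9,8,7,6,5,4,3,2,1] : List Int).flatMap (fun d => repl lx ly d.toNat)
       let s := L ++ repl lx ly 0
       if s = [] then "-1" else if s[0]! == '0' then "0" else String.mk s) := by
  simp only []
  set L := ([9,8,7,6,5,4,3,2,1] : List Int).flatMap (fun d => repl lx ly d.toNat) with hLdef
  have hr0 : repl lx ly 0 = List.replicate (min (lx.count '0') (ly.count '0')) '0' := rfl
  have hmem : ∀ c ∈ L, c ≠ '0' := by
    intro c hc
    rw [hLdef] at hc
    simp only [List.mem_flatMap] at hc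
    obtain ⟨d, hd, hcd⟩ := hc
    simp only [repl] at hcd
    have hcd' : c = Char.ofNat (48 + d.toNat) := List.eq_of_mem_replicate hcd
    subst hcd'
    fin_cases hd <;> decide
  by_cases hL : L = []
  · rcases Nat.eq_zero_or_pos (min (lx.count '0') (ly.count '0')) with hm | hm
    · simp [hL, hr0, hm]
    · obtain ⟨k, hk⟩ : ∃ k, min (lx.count '0') (ly.count '0') = k + 1 :=
        ⟨_, (Nat.succ_pred_eq_of_pos hm).symm⟩
      rw [hL]
      simp [hr0, hk, List.replicate_succ, show String.mk ['0'] = "0" from rfl]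
  · obtain ⟨h, t, hht⟩ := List.exists_cons_of_ne_nil hL
    have hh0 : h ≠ '0' := hmem h (by simp [hht])
    have hAns : (if 0 < min (lx.count '0') (ly.count '0') then
        (if L = [] then ['0'] else L ++ repl lx ly 0) else L) = L ++ repl lx ly 0 := by
      rcases Nat.eq_zero_or_pos (min (lx.count '0') (ly.count '0')) with hm | hm
      · simp [hm, hr0]
      · simp [hm, hL]
    rw [hAns, hht]
    simp [hh0]

-- ===== B-side: the sorted digit lists are canonical descending blocks, and interDesc intersects them =====

def digD : List Char := ['9','8','7','6','5','4','3','2','1','0']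

lemma mem_digD_iff (a : Char) : a ∈ digD ↔ (48 ≤ a.toNat ∧ a.toNat ≤ 57) := by
  constructor
  · intro h
    fin_cases h <;> decide
  · rintro ⟨h1, h2⟩
    have h10 : a.toNat = 48 ∨ a.toNat = 49 ∨ a.toNat = 50 ∨ a.toNat = 51 ∨ a.toNat = 52 ∨
        a.toNat = 53 ∨ a.toNat = 54 ∨ a.toNat = 55 ∨ a.toNat = 56 ∨ a.toNat = 57 := by omega
    rcases h10 with h|h|h|h|h|h|h|h|h|h
    · rw [char_eq_of_toNat a '0' (by rw [h]; rfl)]; decide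
    · rw [char_eq_of_toNat a '1' (by rw [h]; rfl)]; decide
    · rw [char_eq_of_toNat a '2' (by rw [h]; rfl)]; decide
    · rw [char_eq_of_toNat a '3' (by rw [h]; rfl)]; decide
    · rw [char_eq_of_toNat a '4' (by rw [h]; rfl)]; decide
    · rw [char_eq_of_toNat a '5' (by rw [h]; rfl)]; decide
    · rw [char_eq_of_toNat a '6' (by rw [h]; rfl)]; decide
    · rw [char_eq_of_toNat a '7' (by rw [h]; rfl)]; decide
    · rw [char_eq_of_toNat a '8' (by rw [h]; rfl)]; decide
    · rw [char_eq_of_toNat a '9' (by rw [h]; rfl)]; decide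

lemma count_flat_repl (ds : List Char) (hnd : ds.Nodup) (f : Char → Nat) (c : Char) :
    (ds.flatMap fun d => List.replicate (f d) d).count c = if c ∈ ds then f c else 0 := by
  induction ds with
  | nil => simp
  | cons d t ih =>
    rw [List.nodup_cons] at hnd
    simp only [List.flatMap_cons, List.count_append, List.count_replicate, ih hnd.2]
    by_cases hc : c = d
    · subst hc
      simp [hnd.1]
    · simp [hc, Ne.symm hc]

lemma perm_canon (l : List Char) :
    (digD.flatMap fun c => List.replicate (l.count c) c).Perm
      (l.filter (fun c => decide ('0' ≤ c ∧ c ≤ '9'))) := by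
  rw [List.perm_iff_count]
  intro a
  rw [count_flat_repl digD (by decide) _ a]
  by_cases hm : a ∈ digD
  · have hd : (decide ('0' ≤ a ∧ a ≤ '9')) = true := by
      rw [decide_eq_true_iff, digit_le_iff]
      exact (mem_digD_iff a).1 hm
    rw [if_pos hm, List.count_filter (p := fun c => decide ('0' ≤ c ∧ c ≤ '9')) hd]
  · rw [if_neg hm, eq_comm, List.count_eq_zero]
    intro hmem
    exact hm ((mem_digD_iff a).2 ((digit_le_iff a).1
      (of_decide_eq_true (List.mem_filter.1 hmem).2)))

lemma pairwise_flat_repl (ds : List Char) (hp : ds.Pairwise (fun a b => b < a)) (f : Char → Nat) :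
    (ds.flatMap fun d => List.replicate (f d) d).Pairwise (fun a b => b ≤ a) := by
  induction ds with
  | nil => simp
  | cons d t ih =>
    rw [List.pairwise_cons] at hp
    simp only [List.flatMap_cons]
    refine List.pairwise_append.2 ⟨List.pairwise_replicate.2 (Or.inr le_rfl), ih hp.2, ?_⟩
    intro x hx y hy
    obtain ⟨e, he, hye⟩ := List.mem_flatMap.1 hy
    rw [List.eq_of_mem_replicate hx, List.eq_of_mem_replicate hye]
    exact le_of_lt (hp.1 e he)

lemma sorted_eq_canon (l : List Char) :
    PySem.List.sorted (l.filter (fun c => decide ('0' ≤ c ∧ c ≤ '9'))) (fun c => c) true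
      = digD.flatMap fun c => List.replicate (l.count c) c := by
  refine List.Perm.eq_of_pairwise (le := fun a b => b ≤ a)
    (fun a b _ _ h1 h2 => le_antisymm h2 h1) ?_ ?_ ?_
  · exact PySem.List.sorted_pairwise_rev _ _
  · exact pairwise_flat_repl digD (by decide) _
  · exact (PySem.List.sorted_perm _ _ _).trans (perm_canon l).symm

lemma interDesc_nil_right (A : List Char) : interDesc A [] = [] := by
  cases A <;> simp [interDesc]

lemma skip_right (A B : List Char) (b : Char) (hA : ∀ x ∈ A, x < b) :
    interDesc A (b :: B) = interDesc A B := by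
  cases A with
  | nil => simp [interDesc]
  | cons x xs =>
    have hx := hA x (by simp)
    have h1 : (x == b) = false := by simp [ne_of_lt hx]
    have h2 : ¬ (x > b) := lt_asymm hx
    simp [interDesc, h1, h2]

lemma skip_right_repl (A B : List Char) (b : Char) (k : Nat) (hA : ∀ x ∈ A, x < b) :
    interDesc A (List.replicate k b ++ B) = interDesc A B := by
  induction k with
  | zero => simp
  | succ k ih => rw [List.replicate_succ, List.cons_append, skip_right A _ b hA, ih]

lemma skip_left (A B : List Char) (a : Char) (hB : ∀ y ∈ B, y < a) :
    interDesc (a :: A) B = interDesc A B := by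
  cases B with
  | nil => simp [interDesc_nil_right]
  | cons y ys =>
    have hy := hB y (by simp)
    have h1 : (a == y) = false := by simp [(ne_of_lt hy).symm]
    have h2 : a > y := hy
    simp [interDesc, h1, h2]

lemma skip_left_repl (A B : List Char) (a : Char) (k : Nat) (hB : ∀ y ∈ B, y < a) :
    interDesc (List.replicate k a ++ A) B = interDesc A B := by
  induction k with
  | zero => simp
  | succ k ih => rw [List.replicate_succ, List.cons_append, skip_left _ B a hB, ih]

lemma inter_block (c : Char) (A B : List Char) (hA : ∀ x ∈ A, x < c) (hB : ∀ y ∈ B, y < c)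
    (a b : Nat) :
    interDesc (List.replicate a c ++ A) (List.replicate b c ++ B)
      = List.replicate (min a b) c ++ interDesc A B := by
  induction a generalizing b with
  | zero => simp [skip_right_repl A B c b hA]
  | succ a ih =>
    cases b with
    | zero => simp [skip_left_repl A B c (a + 1) hB]
    | succ b =>
      rw [List.replicate_succ, List.replicate_succ, List.cons_append, List.cons_append]
      simp only [interDesc, BEq.rfl, if_true]
      rw [ih b, Nat.succ_min_succ, List.replicate_succ, List.cons_append]

lemma lt_of_mem_flat (t : List Char) (d : Char) (hp : ∀ d' ∈ t, d' < d) (f : Char → Nat) :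
    ∀ x ∈ t.flatMap (fun e => List.replicate (f e) e), x < d := by
  intro x hx
  obtain ⟨e, he, hxe⟩ := List.mem_flatMap.1 hx
  rw [List.eq_of_mem_replicate hxe]
  exact hp e he

lemma inter_canon (ds : List Char) (hp : ds.Pairwise (fun a b => b < a)) (f g : Char → Nat) :
    interDesc (ds.flatMap fun d => List.replicate (f d) d)
        (ds.flatMap fun d => List.replicate (g d) d)
      = ds.flatMap fun d => List.replicate (min (f d) (g d)) d := by
  induction ds with
  | nil => simp [interDesc]
  | cons d t ih =>
    rw [List.pairwise_cons] at hp
    simp only [List.flatMap_cons]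
    rw [inter_block d _ _ (lt_of_mem_flat t d hp.1 f) (lt_of_mem_flat t d hp.1 g) (f d) (g d),
      ih hp.2]

lemma canon_min_eq (lx ly : List Char) :
    (digD.flatMap fun c => List.replicate (min (lx.count c) (ly.count c)) c)
      = (([9,8,7,6,5,4,3,2,1] : List Int).flatMap (fun d => repl lx ly d.toNat))
          ++ repl lx ly 0 := by
  simp only [digD, List.flatMap_cons, List.flatMap_nil, List.append_nil, repl, List.append_assoc]
  rfl

lemma hB (X Y : String) : solution_alt X Y =
    (let L := ([9,8,7,6,5,4,3,2,1] : List Int).flatMap (fun d => repl X.toList Y.toList d.toNat)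
     let s := L ++ repl X.toList Y.toList 0
     if s = [] then "-1" else if s[0]! == '0' then "0" else String.mk s) := by
  simp only [solution_alt]
  rw [sorted_eq_canon X.toList, sorted_eq_canon Y.toList,
    inter_canon digD (by decide) (fun c => X.toList.count c) (fun c => Y.toList.count c),
    canon_min_eq]

-- ===== VERDICT (by name: the statement is the Claim_ definition above) =====
theorem solution_spec : Claim_equal_solution := by
  intro X Y _
  unfold Spec_solution
  rw [hA, final X.toList Y.toList, ← hB]
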